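-- pv_equiv track=rewrite | github.com/dim272/gadget_price | parsing/Main.py | _price_parsing_sorter
-- ===== SOURCE A (Python) =====
-- def _price_parsing_sorter(list_):
--     new_data = {}
--     for one_dict in list_:
--         for key in one_dict:
--             try:
--                 val = new_data[key]
--                 new_data[key] = val + [one_dict[key]]
--             except KeyError:
--                 new_data[key] = [one_dict[key]]
--
--     result = {}
--     for key in new_data:
--         max_price = max(new_data[key])
--         min_price = min(new_data[key])
--         max_key = 'max_' + key
--         min_key = 'min_' + key
--
--         result[max_key] = max_price
--         result[min_key] = min_price
--
--     return result
-- ===== SOURCE B (Python) =====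
-- def _price_parsing_sorter(list_):
--     pairs = [(k, v) for d in list_ for k, v in d.items()]
--     stats = {}
--     for k, v in pairs:
--         mx, mn = stats.get(k, (v, v))
--         stats[k] = (max(mx, v), min(mn, v))
--     out = []
--     for k, (mx, mn) in stats.items():
--         out.append(('max_' + k, mx))
--         out.append(('min_' + k, mn))
--     return dict(out)
-- ===== Notes on version B (the rewrite author's own statement) =====
-- stated objective: alternative
-- what changed: B flattens all (key, value) pairs once and keeps a running (max, min) pair per key via dict.get with a default, then emits the output as a flat tuple list, instead of A's nested loops growing per-key value lists by concatenation and a second dict-building pass scanning each list with max() and min().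
import Mathlib
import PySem

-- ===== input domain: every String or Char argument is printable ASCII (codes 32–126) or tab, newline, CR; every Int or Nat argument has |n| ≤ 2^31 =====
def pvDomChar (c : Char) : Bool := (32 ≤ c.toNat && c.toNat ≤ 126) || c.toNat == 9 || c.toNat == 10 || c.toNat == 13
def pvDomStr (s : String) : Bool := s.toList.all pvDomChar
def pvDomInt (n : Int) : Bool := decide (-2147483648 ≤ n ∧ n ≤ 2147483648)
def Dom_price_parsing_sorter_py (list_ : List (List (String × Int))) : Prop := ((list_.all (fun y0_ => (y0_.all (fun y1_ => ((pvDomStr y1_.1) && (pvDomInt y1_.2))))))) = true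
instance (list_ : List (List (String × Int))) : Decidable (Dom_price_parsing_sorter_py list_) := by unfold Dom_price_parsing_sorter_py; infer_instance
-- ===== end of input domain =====

-- B flattens the pairs once and keeps a running (max, min) per key, emitting the output as a flat
-- tuple list, instead of A's nested loops growing per-key lists by concatenation and a second
-- dict-building pass scanning each list (objective: alternative; same asymptotic cost).

-- ===== PORT A =====
-- A's inner try/except body: extend the key's list, or start it
def pvStepA (d : PySem.Dict String (List Int)) (kv : String × Int) : PySem.Dict String (List Int) :=
  match d.get? kv.1 with
  | some val => d.insert kv.1 (val ++ [kv.2])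
  | none     => d.insert kv.1 [kv.2]

def price_parsing_sorter_py (list_ : List (List (String × Int))) : List (String × Int) :=
  let new_data : PySem.Dict String (List Int) :=
    list_.foldl (fun d one_dict => (PySem.Dict.ofList one_dict).items.foldl pvStepA d)
      PySem.Dict.empty
  let result : PySem.Dict String Int :=
    new_data.items.foldl (fun r kv =>
      let max_price := (PySem.List.max? kv.2 (fun y => y)).getD 0   -- per-key list is never empty, so Python's max/min never raise
      let min_price := (PySem.List.min? kv.2 (fun y => y)).getD 0
      (r.insert ("max_" ++ kv.1) max_price).insert ("min_" ++ kv.1) min_price)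
      PySem.Dict.empty
  result.items

-- ===== PORT B =====
-- running (max, min) update for one flattened pair
def pvStepB (d : PySem.Dict String (Int × Int)) (p : String × Int) : PySem.Dict String (Int × Int) :=
  let mm := d.getD p.1 (p.2, p.2)
  d.insert p.1 (max mm.1 p.2, min mm.2 p.2)

def price_parsing_sorter_py_alt (list_ : List (List (String × Int))) : List (String × Int) :=
  let pairs : List (String × Int) := list_.flatMap (fun d => (PySem.Dict.ofList d).items)
  let stats : PySem.Dict String (Int × Int) := pairs.foldl pvStepB PySem.Dict.empty
  let out : List (String × Int) :=
    stats.items.flatMap (fun kv => [("max_" ++ kv.1, kv.2.1), ("min_" ++ kv.1, kv.2.2)])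
  (PySem.Dict.ofList out).items

-- ===== PRECONDITION & SPEC =====
def Spec_price_parsing_sorter_py (list_ : List (List (String × Int))) (out : List (String × Int)) : Prop := out = price_parsing_sorter_py_alt list_
instance (list_ : List (List (String × Int))) (out : List (String × Int)) : Decidable (Spec_price_parsing_sorter_py list_ out) := by unfold Spec_price_parsing_sorter_py; infer_instance

-- ===== CLAIM (what is proved, stated in full; the proofs are below) =====
def Claim_equal_price_parsing_sorter_py : Prop := ∀ (list_ : List (List (String × Int))), Dom_price_parsing_sorter_py list_ → Spec_price_parsing_sorter_py list_ (price_parsing_sorter_py list_)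

-- ===== LEMMAS AND PROOFS =====

-- A's try/except step is exactly dict.modify with default []
lemma pvStepA_eq_modify (d : PySem.Dict String (List Int)) (kv : String × Int) :
    pvStepA d kv = d.modify kv.1 [] (fun l => l ++ [kv.2]) := by
  unfold pvStepA
  simp [PySem.Dict.modify, PySem.Dict.getD_eq_get?_getD]
  cases d.get? kv.1 <;> rfl

-- A's nested grouping loops are one fold over the flattened pair list
lemma pvFlattenA (ll : List (List (String × Int))) (d : PySem.Dict String (List Int)) :
    ll.foldl (fun d one_dict => (PySem.Dict.ofList one_dict).items.foldl pvStepA d) d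
      = (ll.flatMap (fun od => (PySem.Dict.ofList od).items)).foldl pvStepA d := by
  induction ll generalizing d with
  | nil => rfl
  | cons od t ih => simp only [List.foldl_cons, List.flatMap_cons, List.foldl_append, ih]

-- string tag facts
lemma pvTagInj (p a b : String) (h : p ++ a = p ++ b) : a = b := by
  have := congrArg String.toList h
  simp at this
  exact String.toList_inj.mp this

lemma pvMaxNeMin (a b : String) : "max_" ++ a ≠ "min_" ++ b := by
  intro h
  have := congrArg String.toList h
  simp at this

-- the generated result keys are pairwise distinct
lemma pvNodupTags (K : List String) (hK : K.Nodup) :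
    (K.flatMap (fun k => ["max_" ++ k, "min_" ++ k])).Nodup := by
  induction K with
  | nil => simp
  | cons k t ih =>
      rcases List.nodup_cons.mp hK with ⟨hkm, ht⟩
      simp only [List.flatMap_cons, List.cons_append, List.nil_append]
      refine List.nodup_cons.mpr ⟨?_, List.nodup_cons.mpr ⟨?_, ih ht⟩⟩
      · simp only [List.mem_cons, List.mem_flatMap, List.not_mem_nil, or_false]
        rintro (h | ⟨k', hk', h | h⟩)
        · exact pvMaxNeMin k k h
        · cases pvTagInj _ _ _ h; exact hkm hk'
        · exact pvMaxNeMin k k' h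
      · simp only [List.mem_flatMap, List.mem_cons, List.not_mem_nil, or_false]
        rintro ⟨k', hk', h | h⟩
        · exact pvMaxNeMin k' k h.symm
        · cases pvTagInj _ _ _ h; exact hkm hk'

-- A's result loop (two inserts per item) is a single-insert fold over the emitted pair list
lemma pvResultA (l : List (String × List Int)) (r : PySem.Dict String Int) :
    l.foldl (fun r kv =>
        (r.insert ("max_" ++ kv.1) ((PySem.List.max? kv.2 (fun y => y)).getD 0)).insert
          ("min_" ++ kv.1) ((PySem.List.min? kv.2 (fun y => y)).getD 0)) r
      = (l.flatMap (fun kv =>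
          [("max_" ++ kv.1, (PySem.List.max? kv.2 (fun y => y)).getD 0),
           ("min_" ++ kv.1, (PySem.List.min? kv.2 (fun y => y)).getD 0)])).foldl
          (fun r q => r.insert q.1 q.2) r := by
  induction l generalizing r with
  | nil => rfl
  | cons kv t ih => simp only [List.foldl_cons, List.flatMap_cons, List.foldl_append, List.foldl_nil, ih]

-- a single-insert fold over pairs with distinct keys, from empty, lists exactly those pairs
lemma pvFreshItems (l : List (String × Int)) (hnd : (l.map (fun p => p.1)).Nodup) :
    (l.foldl (fun r q => r.insert q.1 q.2) PySem.Dict.empty).items = l := by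
  have h := PySem.Dict.items_foldl_insert_fresh l (fun q => q.1) (fun q => q.2)
      PySem.Dict.empty (by intro a _; simp) hnd
  simpa using h

-- B's running-update fold, observed at one key, is a fold over that key's values
lemma pvStatsGet (l : List (String × Int)) (d : PySem.Dict String (Int × Int)) (k : String) :
    (l.foldl pvStepB d).get? k
      = ((l.filter (fun p => p.1 == k)).map (fun p => p.2)).foldl
          (fun o v => some (max (o.getD (v, v)).1 v, min (o.getD (v, v)).2 v)) (d.get? k) := by
  induction l generalizing d with
  | nil => rfl
  | cons p t ih =>
      rw [List.foldl_cons, ih]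
      by_cases h : p.1 = k
      · subst h
        simp [pvStepB, PySem.Dict.get?_insert_self,
          PySem.Dict.getD_eq_get?_getD]
      · have hne : k ≠ p.1 := fun hk => h hk.symm
        simp only [pvStepB]
        rw [PySem.Dict.get?_insert_of_ne d _ hne]
        simp [h]

-- the running fold from a seeded pair is the running max and min
lemma pvRunPair (t : List Int) (a b : Int) :
    t.foldl (fun o v => some (max (o.getD (v, v)).1 v, min (o.getD (v, v)).2 v)) (some (a, b))
      = some (t.foldl max a, t.foldl min b) := by
  induction t generalizing a b with
  | nil => rfl
  | cons x t ih => simp [ih]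

-- ===== VERDICT (by name: the statement is the Claim_ definition above) =====
theorem price_parsing_sorter_py_spec : Claim_equal_price_parsing_sorter_py := by
  intro list_ _hdom
  unfold Spec_price_parsing_sorter_py
  unfold price_parsing_sorter_py price_parsing_sorter_py_alt
  simp only []
  set pairs : List (String × Int) := list_.flatMap (fun d => (PySem.Dict.ofList d).items) with hpairs
  set K : List String := PySem.Set.ofList (pairs.map (fun p => p.1)) with hK
  have hKnodup : K.Nodup := PySem.Set.nodup_ofList _
  set vals : String → List Int := fun k => (pairs.filter (fun p => p.1 == k)).map (fun p => p.2)
    with hvals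
  have hmem : ∀ k ∈ K, ∃ x t, vals k = x :: t := by
    intro k hk
    rw [hK, PySem.Set.mem_ofList, List.mem_map] at hk
    obtain ⟨p, hp, rfl⟩ := hk
    have : p ∈ pairs.filter (fun q => q.1 == p.1) := List.mem_filter.mpr ⟨hp, by simp⟩
    rcases hf : pairs.filter (fun q => q.1 == p.1) with _ | ⟨x, t⟩
    · rw [hf] at this; cases this
    · exact ⟨x.2, (t.map (fun q => q.2)), by simp only [hvals]; rw [hf]; simp⟩
  -- ---- A's side ----
  rw [pvFlattenA]
  rw [show pvStepA = (fun d (p : String × Int) => d.modify p.1 [] (fun l => l ++ [p.2]))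
        from funext fun d => funext fun kv => pvStepA_eq_modify d kv]
  set nd := pairs.foldl (fun d (p : String × Int) => d.modify p.1 [] (fun l => l ++ [p.2]))
      PySem.Dict.empty with hnd
  have hkeys : nd.keys = K := by
    have h := PySem.Dict.keys_foldl_modify_key pairs (fun p => p.1) []
        (fun _ p => (fun l => l ++ [p.2])) PySem.Dict.empty
    simpa [PySem.Set.update_nil_left] using h
  have hgetD : ∀ k, nd.getD k [] = vals k := by
    intro k
    have h := PySem.Dict.getD_foldl_modify_append pairs PySem.Dict.empty k
    simpa using h
  have hitems : nd.items = K.map (fun k => (k, vals k)) := by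
    rw [PySem.Dict.items_eq_map_keys nd (by rw [hkeys]; exact hKnodup) [], hkeys]
    exact List.map_congr_left (fun k _ => by rw [hgetD k])
  rw [hitems, pvResultA, List.flatMap_map]
  -- ---- B's side ----
  set stats := pairs.foldl pvStepB PySem.Dict.empty with hstats
  have hkeysB : stats.keys = K := by
    have h := PySem.Dict.keys_foldl_insert_key pairs (fun p => p.1)
        (fun d p => (max (d.getD p.1 (p.2, p.2)).1 p.2, min (d.getD p.1 (p.2, p.2)).2 p.2))
        PySem.Dict.empty
    simpa [pvStepB, PySem.Set.update_nil_left] using h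
  have hitemsB : stats.items = K.map (fun k =>
      (k, ((PySem.List.max? (vals k) (fun y => y)).getD 0,
           (PySem.List.min? (vals k) (fun y => y)).getD 0))) := by
    rw [PySem.Dict.items_eq_map_keys stats (by rw [hkeysB]; exact hKnodup) (0, 0), hkeysB]
    refine List.map_congr_left (fun k hk => ?_)
    obtain ⟨x, t, hxt⟩ := hmem k hk
    have hg : stats.get? k = some (t.foldl max x, t.foldl min x) := by
      rw [hstats, pvStatsGet]
      show ((vals k).foldl _ _) = _
      rw [hxt]
      simp [PySem.Dict.get?_empty, pvRunPair]
    rw [PySem.Dict.getD_eq_get?_getD, hg, hxt]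
    simp [PySem.List.max?_id_cons, PySem.List.min?_id_cons]
  rw [hitemsB, List.flatMap_map]
  -- ---- both sides are the same fresh-keyed pair list ----
  set out : List (String × Int) := K.flatMap (fun k =>
      [("max_" ++ k, (PySem.List.max? (vals k) (fun y => y)).getD 0),
       ("min_" ++ k, (PySem.List.min? (vals k) (fun y => y)).getD 0)]) with hout
  have hfreshnd : ((out.map (fun p => p.1))).Nodup := by
    rw [hout, List.map_flatMap]
    simpa using pvNodupTags _ hKnodup
  have hB : PySem.Dict.ofList out
      = out.foldl (fun r (q : String × Int) => r.insert q.1 q.2) PySem.Dict.empty := rfl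
  rw [hB, pvFreshItems out hfreshnd]
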